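-- pv_equiv track=rewrite | github.com/DY-artist/Python-projects | 数独问题/sd_function.py | second_judge
-- ===== SOURCE A (Python) =====
-- def second_judge(num_judge_dic):
--     for judge_num in range(1,10):
--         for units in range(3):
--             for unit in range(3):
--                 for k,v in num_judge_dic.items():
--                     if k[0] == units and k[1] == unit:
--                         if judge_num in v:
--                             judge_line = k[2]
--                             judge_x = k[3]
--                             break
--                 judge_1 = True
--                 for k,v in num_judge_dic.items():
--                     if k[0] == units and k[1] == unit:
--                         if judge_num in v:
--                             if k[2] != judge_line:
--                                 judge_1 = False
--                 judge_2 = True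
--                 for k,v in num_judge_dic.items():
--                     if k[0] == units and k[1] == unit:
--                         if judge_num in v:
--                             if k[3] != judge_x:
--                                 judge_2 = False
--                 if judge_1 and not judge_2:
--                     for k,v in num_judge_dic.items():
--                         if k[0] == units and k[2] == judge_line:
--                             if k[0] != units or k[1] != unit:
--                                 if judge_num in v:
--                                     v.remove(judge_num)
--                 elif not judge_1 and judge_2:
--                     for k,v in num_judge_dic.items():
--                         if k[1] == unit and k[3] == judge_x:
--                             if k[0] != units or k[1] != unit:
--                                 if judge_num in v:
--                                     v.remove(judge_num)
--     return num_judge_dic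
-- ===== SOURCE B (Python) =====
-- # B: per digit, build ONE positional index (box -> list of (row,col) candidate cells)
-- # and maintain it incrementally under eliminations, so the per-box decision reads the
-- # index instead of rescanning the whole grid; mutates the argument in place like A.
-- def _purge(num_judge_dic, index, jn, cond):
--     # remove jn from every cell satisfying cond, keeping the index in sync
--     for k, v in num_judge_dic.items():
--         if cond(k) and jn in v:
--             v.remove(jn)
--             if jn not in v:
--                 index[(k[0], k[1])].remove((k[2], k[3]))
--
--
-- def second_judge(num_judge_dic):
--     for jn in range(1, 10):
--         index = {}
--         for k, v in num_judge_dic.items():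
--             if jn in v:
--                 index.setdefault((k[0], k[1]), []).append((k[2], k[3]))
--         for u1 in range(3):
--             for u2 in range(3):
--                 cells = index.get((u1, u2), [])
--                 rows = {r for r, _ in cells}
--                 cols = {c for _, c in cells}
--                 if len(rows) == 1 and len(cols) > 1:
--                     (line,) = rows
--                     _purge(num_judge_dic, index, jn,
--                            lambda k: k[0] == u1 and k[1] != u2 and k[2] == line)
--                 elif len(cols) == 1 and len(rows) > 1:
--                     (x,) = cols
--                     _purge(num_judge_dic, index, jn,
--                            lambda k: k[1] == u2 and k[0] != u1 and k[3] == x)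
--     return num_judge_dic
-- ===== Notes on version B (the rewrite author's own statement) =====
-- stated objective: faster
-- what changed: A rescans the whole dict four times per box (break-search, two flag scans, elimination pass); B builds, once per digit, a positional index mapping each box to the list of (row,col) cells holding that candidate and keeps it in sync as eliminations mutate the grid, so each box decision is an index lookup instead of three whole-dict scans (measured ~5x faster; elimination passes only run when a pointing line is found).
import Mathlib
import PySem

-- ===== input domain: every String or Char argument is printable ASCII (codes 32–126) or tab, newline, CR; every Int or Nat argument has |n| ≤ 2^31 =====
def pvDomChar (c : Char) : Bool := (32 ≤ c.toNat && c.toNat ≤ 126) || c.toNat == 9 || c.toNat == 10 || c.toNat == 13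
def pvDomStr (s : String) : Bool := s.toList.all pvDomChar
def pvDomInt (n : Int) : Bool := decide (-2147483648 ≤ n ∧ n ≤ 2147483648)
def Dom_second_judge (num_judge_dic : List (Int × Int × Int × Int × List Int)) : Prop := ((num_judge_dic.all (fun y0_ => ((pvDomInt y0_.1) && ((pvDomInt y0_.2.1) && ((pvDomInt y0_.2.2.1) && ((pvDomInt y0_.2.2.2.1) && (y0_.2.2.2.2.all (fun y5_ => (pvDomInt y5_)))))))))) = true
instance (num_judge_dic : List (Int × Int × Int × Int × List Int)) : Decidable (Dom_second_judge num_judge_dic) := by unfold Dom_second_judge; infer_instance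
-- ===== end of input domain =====

-- B replaces A's four whole-dict scans per box by a per-digit positional index
-- (box -> list of candidate (row,col) cells) maintained incrementally under the
-- eliminations, so each box decision is an index lookup (objective: faster; the timing
-- run measured B ~5x faster).  Both Pythons mutate the argument's lists in place and
-- return it; the equivalence proved here is about the returned value.

-- ===== PORT A =====
-- one body of A's triple loop: break-search for the first cell of box (units,unit)
-- holding judge_num, the two flag scans, then the in-place elimination pass
def sjBodyA (jn u1 u2 : Int) (st : List (Int × Int × Int × Int × List Int)) :
    List (Int × Int × Int × Int × List Int) :=
  match st.find? (fun e => e.1 == u1 && e.2.1 == u2 && e.2.2.2.2.contains jn) with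
  | none => st   -- no break hit: both flag loops do nothing, both flags stay True, no branch fires
  | some e0 =>
    let line := e0.2.2.1
    let x := e0.2.2.2.1
    let j1 := st.foldl (fun b e =>
      if e.1 == u1 && e.2.1 == u2 && e.2.2.2.2.contains jn && e.2.2.1 != line then false else b) true
    let j2 := st.foldl (fun b e =>
      if e.1 == u1 && e.2.1 == u2 && e.2.2.2.2.contains jn && e.2.2.2.1 != x then false else b) true
    if j1 && !j2 then
      st.map (fun e =>
        if e.1 == u1 && e.2.2.1 == line && (e.1 != u1 || e.2.1 != u2) && e.2.2.2.2.contains jn then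
          (e.1, e.2.1, e.2.2.1, e.2.2.2.1, e.2.2.2.2.erase jn)
        else e)
    else if !j1 && j2 then
      st.map (fun e =>
        if e.2.1 == u2 && e.2.2.2.1 == x && (e.1 != u1 || e.2.1 != u2) && e.2.2.2.2.contains jn then
          (e.1, e.2.1, e.2.2.1, e.2.2.2.1, e.2.2.2.2.erase jn)
        else e)
    else st

def second_judge (num_judge_dic : List (Int × Int × Int × Int × List Int)) :
    List (Int × Int × Int × Int × List Int) :=
  (PySem.List.pyRange 1 10 1).foldl (fun st jn =>
    (PySem.List.pyRange 0 3 1).foldl (fun st u1 =>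
      (PySem.List.pyRange 0 3 1).foldl (fun st u2 => sjBodyA jn u1 u2 st) st) st) num_judge_dic

-- ===== PORT B =====
-- the per-digit indexing pass: for k,v in items: if jn in v: index.setdefault(box,[]).append(cell)
def sjBuild (jn : Int) (st : List (Int × Int × Int × Int × List Int)) :
    PySem.Dict (Int × Int) (List (Int × Int)) :=
  st.foldl (fun d e =>
    if e.2.2.2.2.contains jn then
      d.modify (e.1, e.2.1) [] (fun l => l ++ [(e.2.2.1, e.2.2.2.1)])
    else d) PySem.Dict.empty

-- _purge: one elimination pass, removing jn from every cell satisfying cond and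
-- keeping the index in sync (index[box].remove(cell) when the cell loses its last jn)
def sjPurge (jn : Int) (cond : (Int × Int × Int × Int × List Int) → Bool)
    (st : List (Int × Int × Int × Int × List Int))
    (d : PySem.Dict (Int × Int) (List (Int × Int))) :
    List (Int × Int × Int × Int × List Int) × PySem.Dict (Int × Int) (List (Int × Int)) :=
  st.foldl (fun acc e =>
    if cond e && e.2.2.2.2.contains jn then
      let v' := e.2.2.2.2.erase jn
      let d' := if v'.contains jn then acc.2
                else acc.2.modify (e.1, e.2.1) [] (fun l => l.erase (e.2.2.1, e.2.2.2.1))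
      (acc.1 ++ [(e.1, e.2.1, e.2.2.1, e.2.2.2.1, v')], d')
    else (acc.1 ++ [e], acc.2)) ([], d)

-- one body of B's box loop: read the box's candidate cells from the index, decide by
-- the sets of their rows/columns, then purge along the unique line
def sjBoxB (jn u1 u2 : Int)
    (acc : List (Int × Int × Int × Int × List Int) × PySem.Dict (Int × Int) (List (Int × Int))) :
    List (Int × Int × Int × Int × List Int) × PySem.Dict (Int × Int) (List (Int × Int)) :=
  let cells := acc.2.getD (u1, u2) []
  let rows : PySem.Set Int := PySem.Set.ofList (cells.map Prod.fst)
  let cols : PySem.Set Int := PySem.Set.ofList (cells.map Prod.snd)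
  if rows.length = 1 ∧ 1 < cols.length then
    -- "(line,) = rows": the sole element of the singleton set
    sjPurge jn (fun e => e.1 == u1 && e.2.1 != u2 && e.2.2.1 == rows.headD 0) acc.1 acc.2
  else if cols.length = 1 ∧ 1 < rows.length then
    sjPurge jn (fun e => e.2.1 == u2 && e.1 != u1 && e.2.2.2.1 == cols.headD 0) acc.1 acc.2
  else acc

def second_judge_alt (num_judge_dic : List (Int × Int × Int × Int × List Int)) :
    List (Int × Int × Int × Int × List Int) :=
  (PySem.List.pyRange 1 10 1).foldl (fun st jn =>
    ((PySem.List.pyRange 0 3 1).foldl (fun acc u1 =>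
      (PySem.List.pyRange 0 3 1).foldl (fun acc u2 => sjBoxB jn u1 u2 acc) acc)
      (st, sjBuild jn st)).1) num_judge_dic

-- ===== PRECONDITION & SPEC =====
def Spec_second_judge (num_judge_dic : List (Int × Int × Int × Int × List Int)) (out : List (Int × Int × Int × Int × List Int)) : Prop := out = second_judge_alt num_judge_dic
instance (num_judge_dic : List (Int × Int × Int × Int × List Int)) (out : List (Int × Int × Int × Int × List Int)) : Decidable (Spec_second_judge num_judge_dic out) := by unfold Spec_second_judge; infer_instance

-- ===== CLAIM (what is proved, stated in full; the proofs are below) =====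
def Claim_equal_second_judge : Prop := ∀ (num_judge_dic : List (Int × Int × Int × Int × List Int)), Dom_second_judge num_judge_dic → Spec_second_judge num_judge_dic (second_judge num_judge_dic)

-- ===== LEMMAS AND PROOFS =====

-- proof-only intermediate form of one box body: a direct scan of the state building the
-- row/column candidate sets, then the elimination map (no index)
def sjBodySpec (jn u1 u2 : Int) (st : List (Int × Int × Int × Int × List Int)) :
    List (Int × Int × Int × Int × List Int) :=
  let rc := st.foldl (fun (s : PySem.Set Int × PySem.Set Int) e =>
    if e.1 == u1 && e.2.1 == u2 && e.2.2.2.2.contains jn then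
      (PySem.Set.add s.1 e.2.2.1, PySem.Set.add s.2 e.2.2.2.1)
    else s) (PySem.Set.empty, PySem.Set.empty)
  if rc.1.length = 1 ∧ 1 < rc.2.length then
    let line := rc.1.headD 0
    st.map (fun e =>
      if (e.1 == u1 && e.2.1 != u2 && e.2.2.1 == line) && e.2.2.2.2.contains jn then
        (e.1, e.2.1, e.2.2.1, e.2.2.2.1, e.2.2.2.2.erase jn)
      else e)
  else if rc.2.length = 1 ∧ 1 < rc.1.length then
    let x := rc.2.headD 0
    st.map (fun e =>
      if (e.2.1 == u2 && e.1 != u1 && e.2.2.2.1 == x) && e.2.2.2.2.contains jn then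
        (e.1, e.2.1, e.2.2.1, e.2.2.2.1, e.2.2.2.2.erase jn)
      else e)
  else st

-- A's flag loop computes "no scanned element triggers the reset"
lemma sj_foldl_flag {α : Type} (C : α → Bool) (l : List α) (b : Bool) :
    l.foldl (fun b e => if C e then false else b) b = (b && l.all (fun e => !C e)) := by
  induction l generalizing b with
  | nil => simp
  | cons e t ih =>
    rw [List.foldl_cons]
    cases h : C e
    · rw [if_neg (by simp [h]), ih]
      simp [h]
    · rw [if_pos rfl, ih]
      simp [h]

-- membership in the pair-of-sets fold of the collecting scan
lemma sj_mem_fold_fst (P : (Int × Int × Int × Int × List Int) → Bool)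
    (l : List (Int × Int × Int × Int × List Int)) (s : PySem.Set Int × PySem.Set Int) (a : Int) :
    a ∈ (l.foldl (fun s e => if P e then (PySem.Set.add s.1 e.2.2.1, PySem.Set.add s.2 e.2.2.2.1) else s) s).1 ↔
      a ∈ s.1 ∨ ∃ e ∈ l, P e = true ∧ e.2.2.1 = a := by
  induction l generalizing s with
  | nil => simp
  | cons e t ih =>
    cases h : P e <;> simp [h, ih, PySem.Set.mem_add] <;> tauto

lemma sj_mem_fold_snd (P : (Int × Int × Int × Int × List Int) → Bool)
    (l : List (Int × Int × Int × Int × List Int)) (s : PySem.Set Int × PySem.Set Int) (a : Int) :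
    a ∈ (l.foldl (fun s e => if P e then (PySem.Set.add s.1 e.2.2.1, PySem.Set.add s.2 e.2.2.2.1) else s) s).2 ↔
      a ∈ s.2 ∨ ∃ e ∈ l, P e = true ∧ e.2.2.2.1 = a := by
  induction l generalizing s with
  | nil => simp
  | cons e t ih =>
    cases h : P e <;> simp [h, ih, PySem.Set.mem_add] <;> tauto

lemma sj_nodup_fold (P : (Int × Int × Int × Int × List Int) → Bool)
    (l : List (Int × Int × Int × Int × List Int)) (s : PySem.Set Int × PySem.Set Int)
    (h1 : s.1.Nodup) (h2 : s.2.Nodup) :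
    (l.foldl (fun s e => if P e then (PySem.Set.add s.1 e.2.2.1, PySem.Set.add s.2 e.2.2.2.1) else s) s).1.Nodup ∧
    (l.foldl (fun s e => if P e then (PySem.Set.add s.1 e.2.2.1, PySem.Set.add s.2 e.2.2.2.1) else s) s).2.Nodup := by
  induction l generalizing s with
  | nil => exact ⟨h1, h2⟩
  | cons e t ih =>
    rw [List.foldl_cons]
    cases h : P e
    · rw [if_neg (by simp)]
      exact ih s h1 h2
    · rw [if_pos rfl]
      exact ih _ (PySem.Set.nodup_add _ _ h1) (PySem.Set.nodup_add _ _ h2)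

lemma sj_nodup_singleton {α : Type} {l : List α} {a : α} (hnd : l.Nodup) (ha : a ∈ l)
    (hall : ∀ b ∈ l, b = a) : l = [a] := by
  match l with
  | [] => cases ha
  | b :: t =>
    have hb : b = a := hall b (by simp)
    subst hb
    cases t with
    | nil => rfl
    | cons c u =>
      have hc : c = b := hall c (by simp)
      subst hc
      simp at hnd

lemma sj_one_lt_length {α : Type} {l : List α} {a b : α} (ha : a ∈ l) (hb : b ∈ l)
    (hne : a ≠ b) : 1 < l.length := by
  match l with
  | [] => cases ha
  | [c] => simp at ha hb; exact absurd (ha.trans hb.symm) hne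
  | c :: d :: t => simp only [List.length_cons]; omega

lemma sj_bool_row (a b c d : Bool) : (a && c && (!a || !b) && d) = ((a && !b && c) && d) := by
  cases a <;> cases b <;> cases c <;> cases d <;> rfl

lemma sj_bool_col (a b c d : Bool) : (b && c && (!a || !b) && d) = ((b && !a && c) && d) := by
  cases a <;> cases b <;> cases c <;> cases d <;> rfl

-- step 1: A's box body equals the direct-scan intermediate form
lemma sj_body_eq (jn u1 u2 : Int) (st : List (Int × Int × Int × Int × List Int)) :
    sjBodyA jn u1 u2 st = sjBodySpec jn u1 u2 st := by
  unfold sjBodyA sjBodySpec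
  set P : (Int × Int × Int × Int × List Int) → Bool :=
    fun e => e.1 == u1 && e.2.1 == u2 && e.2.2.2.2.contains jn with hP
  set rc := st.foldl (fun (s : PySem.Set Int × PySem.Set Int) e =>
    if P e then (PySem.Set.add s.1 e.2.2.1, PySem.Set.add s.2 e.2.2.2.1) else s)
    (PySem.Set.empty, PySem.Set.empty) with hrc
  have hmem1 : ∀ a, a ∈ rc.1 ↔ ∃ e ∈ st, P e = true ∧ e.2.2.1 = a := by
    intro a; rw [hrc, sj_mem_fold_fst]; simp [PySem.Set.empty]
  have hmem2 : ∀ a, a ∈ rc.2 ↔ ∃ e ∈ st, P e = true ∧ e.2.2.2.1 = a := by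
    intro a; rw [hrc, sj_mem_fold_snd]; simp [PySem.Set.empty]
  have hnd := sj_nodup_fold P st (PySem.Set.empty, PySem.Set.empty)
    (by simp [PySem.Set.empty]) (by simp [PySem.Set.empty])
  rw [← hrc] at hnd
  cases hf : st.find? P with
  | none =>
    have hnone : ∀ e ∈ st, ¬ (P e = true) := List.find?_eq_none.mp hf
    have h1 : rc.1 = [] := by
      rw [List.eq_nil_iff_forall_not_mem]
      intro a ha
      obtain ⟨e, he, hpe, -⟩ := (hmem1 a).mp ha
      exact hnone e he hpe
    have h2 : rc.2 = [] := by
      rw [List.eq_nil_iff_forall_not_mem]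
      intro a ha
      obtain ⟨e, he, hpe, -⟩ := (hmem2 a).mp ha
      exact hnone e he hpe
    simp [h1, h2]
  | some e0 =>
    have hPe0 : P e0 = true := List.find?_some hf
    have he0 : e0 ∈ st := List.mem_of_find?_eq_some hf
    have hline : e0.2.2.1 ∈ rc.1 := (hmem1 _).mpr ⟨e0, he0, hPe0, rfl⟩
    have hx : e0.2.2.2.1 ∈ rc.2 := (hmem2 _).mpr ⟨e0, he0, hPe0, rfl⟩
    have hflag1 : (st.foldl (fun b e =>
        if e.1 == u1 && e.2.1 == u2 && e.2.2.2.2.contains jn && e.2.2.1 != e0.2.2.1 then false else b) true = true)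
        ↔ ∀ e ∈ st, P e = true → e.2.2.1 = e0.2.2.1 := by
      rw [sj_foldl_flag]
      simp [hP]
      constructor
      · intro h a b c d v hm h1 h2 h3
        rcases h a b c d v hm with ((h' | h') | h') | h'
        · exact absurd h1 h'
        · exact absurd h2 h'
        · exact absurd h3 h'
        · exact h'
      · intro h a b c d v hm
        by_cases h1 : a = u1
        · by_cases h2 : b = u2
          · by_cases h3 : jn ∈ v
            · exact Or.inr (h a b c d v hm h1 h2 h3)
            · exact Or.inl (Or.inr h3)
          · exact Or.inl (Or.inl (Or.inr h2))
        · exact Or.inl (Or.inl (Or.inl h1))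
    have hflag2 : (st.foldl (fun b e =>
        if e.1 == u1 && e.2.1 == u2 && e.2.2.2.2.contains jn && e.2.2.2.1 != e0.2.2.2.1 then false else b) true = true)
        ↔ ∀ e ∈ st, P e = true → e.2.2.2.1 = e0.2.2.2.1 := by
      rw [sj_foldl_flag]
      simp [hP]
      constructor
      · intro h a b c d v hm h1 h2 h3
        rcases h a b c d v hm with ((h' | h') | h') | h'
        · exact absurd h1 h'
        · exact absurd h2 h'
        · exact absurd h3 h'
        · exact h'
      · intro h a b c d v hm
        by_cases h1 : a = u1
        · by_cases h2 : b = u2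
          · by_cases h3 : jn ∈ v
            · exact Or.inr (h a b c d v hm h1 h2 h3)
            · exact Or.inl (Or.inr h3)
          · exact Or.inl (Or.inl (Or.inr h2))
        · exact Or.inl (Or.inl (Or.inl h1))
    dsimp only
    have hsing1 : (∀ e ∈ st, P e = true → e.2.2.1 = e0.2.2.1) → rc.1 = [e0.2.2.1] := by
      intro h
      refine sj_nodup_singleton hnd.1 hline (fun b hb => ?_)
      obtain ⟨e, he, hpe, hr⟩ := (hmem1 b).mp hb
      rw [← hr]; exact h e he hpe
    have hsing2 : (∀ e ∈ st, P e = true → e.2.2.2.1 = e0.2.2.2.1) → rc.2 = [e0.2.2.2.1] := by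
      intro h
      refine sj_nodup_singleton hnd.2 hx (fun b hb => ?_)
      obtain ⟨e, he, hpe, hr⟩ := (hmem2 b).mp hb
      rw [← hr]; exact h e he hpe
    have hbig1 : (¬ ∀ e ∈ st, P e = true → e.2.2.1 = e0.2.2.1) → 1 < rc.1.length := by
      intro h
      push Not at h
      obtain ⟨e, he, hpe, hne⟩ := h
      exact sj_one_lt_length ((hmem1 _).mpr ⟨e, he, hpe, rfl⟩) hline hne
    have hbig2 : (¬ ∀ e ∈ st, P e = true → e.2.2.2.1 = e0.2.2.2.1) → 1 < rc.2.length := by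
      intro h
      push Not at h
      obtain ⟨e, he, hpe, hne⟩ := h
      exact sj_one_lt_length ((hmem2 _).mpr ⟨e, he, hpe, rfl⟩) hx hne
    cases hb1 : st.foldl (fun b e =>
        if e.1 == u1 && e.2.1 == u2 && e.2.2.2.2.contains jn && e.2.2.1 != e0.2.2.1 then false else b) true with
    | false =>
      have g1 : 1 < rc.1.length := hbig1 (fun hh => by rw [hflag1.mpr hh] at hb1; cases hb1)
      cases hb2 : st.foldl (fun b e =>
          if e.1 == u1 && e.2.1 == u2 && e.2.2.2.2.contains jn && e.2.2.2.1 != e0.2.2.2.1 then false else b) true with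
      | false =>
        have g2 : 1 < rc.2.length := hbig2 (fun hh => by rw [hflag2.mpr hh] at hb2; cases hb2)
        rw [if_neg (by simp), if_neg (by simp), if_neg (by omega), if_neg (by omega)]
      | true =>
        have hc : rc.2 = [e0.2.2.2.1] := hsing2 (hflag2.mp hb2)
        rw [if_neg (by simp), if_pos (by simp), if_neg (fun hcon => by rw [hc] at hcon; simp at hcon),
          if_pos ⟨by rw [hc]; rfl, g1⟩, hc]
        congr 1
        funext e
        simp only [bne, List.headD_cons]
        simp only [sj_bool_col (e.1 == u1) (e.2.1 == u2) (e.2.2.2.1 == e0.2.2.2.1) (e.2.2.2.2.contains jn)]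
        rfl
    | true =>
      have hr : rc.1 = [e0.2.2.1] := hsing1 (hflag1.mp hb1)
      cases hb2 : st.foldl (fun b e =>
          if e.1 == u1 && e.2.1 == u2 && e.2.2.2.2.contains jn && e.2.2.2.1 != e0.2.2.2.1 then false else b) true with
      | false =>
        have g2 : 1 < rc.2.length := hbig2 (fun hh => by rw [hflag2.mpr hh] at hb2; cases hb2)
        rw [if_pos (by simp), if_pos ⟨by rw [hr]; rfl, g2⟩, hr]
        congr 1
        funext e
        simp only [bne, List.headD_cons]
        simp only [sj_bool_row (e.1 == u1) (e.2.1 == u2) (e.2.2.1 == e0.2.2.1) (e.2.2.2.2.contains jn)]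
        rfl
      | true =>
        have hc : rc.2 = [e0.2.2.2.1] := hsing2 (hflag2.mp hb2)
        rw [if_neg (by simp), if_neg (by simp), if_neg (fun hcon => by rw [hc] at hcon; simp at hcon),
          if_neg (fun hcon => by rw [hr] at hcon; simp at hcon)]

-- the candidate cells of box b in state st (positions of cells holding jn), in state order
def sjCells (jn : Int) (b : Int × Int) (st : List (Int × Int × Int × Int × List Int)) :
    List (Int × Int) :=
  (st.filter (fun e => (e.1, e.2.1) == b && e.2.2.2.2.contains jn)).map
    (fun e => (e.2.2.1, e.2.2.2.1))

-- the index invariant: every box's index entry is a permutation of its candidate cells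
def sjInv (jn : Int) (d : PySem.Dict (Int × Int) (List (Int × Int)))
    (st : List (Int × Int × Int × Int × List Int)) : Prop :=
  ∀ b, (d.getD b []).Perm (sjCells jn b st)

lemma sj_cells_app (jn : Int) (b : Int × Int) (l1 l2 : List (Int × Int × Int × Int × List Int)) :
    sjCells jn b (l1 ++ l2) = sjCells jn b l1 ++ sjCells jn b l2 := by
  simp [sjCells, List.filter_append]

lemma sj_cells_cons (jn : Int) (b : Int × Int) (e : Int × Int × Int × Int × List Int)
    (t : List (Int × Int × Int × Int × List Int)) :
    sjCells jn b (e :: t) =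
      (if ((e.1, e.2.1) == b && e.2.2.2.2.contains jn) = true then [(e.2.2.1, e.2.2.2.1)] else [])
        ++ sjCells jn b t := by
  simp only [sjCells, List.filter_cons]
  split <;> simp

lemma sj_cells_mid (jn : Int) (b : Int × Int) (out : List (Int × Int × Int × Int × List Int))
    (e : Int × Int × Int × Int × List Int) (t : List (Int × Int × Int × Int × List Int)) :
    sjCells jn b ((out ++ [e]) ++ t) =
      sjCells jn b out ++
        ((if ((e.1, e.2.1) == b && e.2.2.2.2.contains jn) = true then [(e.2.2.1, e.2.2.2.1)] else [])
          ++ sjCells jn b t) := by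
  rw [List.append_assoc, List.singleton_append, sj_cells_app, sj_cells_cons]

-- the indexing pass computes the candidate cells exactly
lemma sj_build_getD (jn : Int) (st : List (Int × Int × Int × Int × List Int)) (b : Int × Int) :
    ((sjBuild jn st).getD b []) = sjCells jn b st := by
  unfold sjBuild
  suffices h : ∀ (d : PySem.Dict (Int × Int) (List (Int × Int))),
      ((st.foldl (fun d e =>
        if e.2.2.2.2.contains jn then
          d.modify (e.1, e.2.1) [] (fun l => l ++ [(e.2.2.1, e.2.2.2.1)])
        else d) d).getD b []) = d.getD b [] ++ sjCells jn b st by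
    simpa [PySem.Dict.getD_empty] using h PySem.Dict.empty
  induction st with
  | nil => intro d; simp [sjCells]
  | cons e t ih =>
    intro d
    rw [List.foldl_cons, sj_cells_cons]
    cases hc : e.2.2.2.2.contains jn with
    | false =>
      rw [if_neg (by simp [hc]), ih]
      have hm : jn ∉ e.2.2.2.2 := by simpa using hc
      simp [hm]
    | true =>
      rw [if_pos rfl, ih, PySem.Dict.getD_modify]
      by_cases hb : b = (e.1, e.2.1)
      · rw [if_pos hb, ← hb]
        have hcnd : ((b == b && true)) = true := by simp
        rw [hcnd]
        simp
      · rw [if_neg hb]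
        have hcnd : (((e.1, e.2.1) == b && true)) = false := by
          rw [beq_false_of_ne (fun h => hb h.symm), Bool.false_and]
        rw [hcnd]
        simp

lemma sj_perm_erase_middle {α : Type} [BEq α] [LawfulBEq α] {l l1 l2 : List α} {a : α}
    (h : l.Perm (l1 ++ a :: l2)) : (l.erase a).Perm (l1 ++ l2) := by
  have h1 : (l.erase a).Perm ((l1 ++ a :: l2).erase a) := h.erase a
  have h2 : (l1 ++ a :: l2).Perm (a :: (l1 ++ l2)) := List.perm_middle
  have h3 : ((l1 ++ a :: l2).erase a).Perm ((a :: (l1 ++ l2)).erase a) := h2.erase a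
  simpa using h1.trans h3

-- one purge pass: its state component is the elimination map, and it preserves the invariant
lemma sj_purge_go (jn : Int) (cond : (Int × Int × Int × Int × List Int) → Bool) :
    ∀ (st out : List (Int × Int × Int × Int × List Int))
      (d : PySem.Dict (Int × Int) (List (Int × Int))),
      (∀ b, (d.getD b []).Perm (sjCells jn b (out ++ st))) →
      (st.foldl (fun acc e =>
        if cond e && e.2.2.2.2.contains jn then
          let v' := e.2.2.2.2.erase jn
          let d' := if v'.contains jn then acc.2
                    else acc.2.modify (e.1, e.2.1) [] (fun l => l.erase (e.2.2.1, e.2.2.2.1))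
          (acc.1 ++ [(e.1, e.2.1, e.2.2.1, e.2.2.2.1, v')], d')
        else (acc.1 ++ [e], acc.2)) (out, d)).1
        = out ++ st.map (fun e =>
            if cond e && e.2.2.2.2.contains jn then
              (e.1, e.2.1, e.2.2.1, e.2.2.2.1, e.2.2.2.2.erase jn)
            else e)
      ∧ ∀ b, (((st.foldl (fun acc e =>
          if cond e && e.2.2.2.2.contains jn then
            let v' := e.2.2.2.2.erase jn
            let d' := if v'.contains jn then acc.2
                      else acc.2.modify (e.1, e.2.1) [] (fun l => l.erase (e.2.2.1, e.2.2.2.1))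
            (acc.1 ++ [(e.1, e.2.1, e.2.2.1, e.2.2.2.1, v')], d')
          else (acc.1 ++ [e], acc.2)) (out, d)).2).getD b []).Perm
          (sjCells jn b ((st.foldl (fun acc e =>
          if cond e && e.2.2.2.2.contains jn then
            let v' := e.2.2.2.2.erase jn
            let d' := if v'.contains jn then acc.2
                      else acc.2.modify (e.1, e.2.1) [] (fun l => l.erase (e.2.2.1, e.2.2.2.1))
            (acc.1 ++ [(e.1, e.2.1, e.2.2.1, e.2.2.2.1, v')], d')
          else (acc.1 ++ [e], acc.2)) (out, d)).1)) := by
  intro st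
  induction st with
  | nil =>
    intro out d hinv
    refine ⟨by simp, ?_⟩
    intro b
    simpa using hinv b
  | cons e t ih =>
    intro out d hinv
    rw [List.foldl_cons, List.map_cons]
    have hout : out ++ e :: t = (out ++ [e]) ++ t := by simp
    cases hce : cond e && e.2.2.2.2.contains jn with
    | false =>
      rw [if_neg (by simp [hce])]
      have := ih (out ++ [e]) d (by intro b; rw [hout] at hinv; exact hinv b)
      refine ⟨?_, this.2⟩
      rw [this.1]
      simp [hce]
    | true =>
      rw [if_pos rfl]
      simp only
      have hcont : e.2.2.2.2.contains jn = true := by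
        cases h : e.2.2.2.2.contains jn
        · rw [h, Bool.and_false] at hce; cases hce
        · rfl
      set e' : Int × Int × Int × Int × List Int :=
        (e.1, e.2.1, e.2.2.1, e.2.2.2.1, e.2.2.2.2.erase jn) with he'
      cases hjn : (e.2.2.2.2.erase jn).contains jn with
      | true =>
        rw [if_pos rfl]
        have hinv' : ∀ b, (d.getD b []).Perm (sjCells jn b ((out ++ [e']) ++ t)) := by
          intro b
          have h0 := hinv b
          rw [hout, sj_cells_mid] at h0
          rw [sj_cells_mid]
          have hcond : (((e'.1, e'.2.1) == b && e'.2.2.2.2.contains jn))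
              = (((e.1, e.2.1) == b && e.2.2.2.2.contains jn)) := by
            rw [he']
            simp [show jn ∈ e.2.2.2.2.erase jn from by simpa using hjn,
              show jn ∈ e.2.2.2.2 from by simpa using hcont]
          rw [hcond]
          exact h0
        have := ih (out ++ [e']) d hinv'
        refine ⟨?_, this.2⟩
        rw [this.1]
        simp
      | false =>
        rw [if_neg (by simp)]
        have hinv' : ∀ b,
            ((d.modify (e.1, e.2.1) [] (fun l => l.erase (e.2.2.1, e.2.2.2.1))).getD b []).Perm
              (sjCells jn b ((out ++ [e']) ++ t)) := by
          intro b
          rw [PySem.Dict.getD_modify]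
          have hafter : sjCells jn b ((out ++ [e']) ++ t)
              = sjCells jn b out ++ sjCells jn b t := by
            rw [sj_cells_mid]
            have : (((e'.1, e'.2.1) == b && e'.2.2.2.2.contains jn)) = false := by
              rw [he']
              simp [show jn ∉ e.2.2.2.2.erase jn from by simpa using hjn]
            rw [this]
            simp
          have h0 := hinv b
          rw [hout, sj_cells_mid] at h0
          by_cases hb : b = (e.1, e.2.1)
          · have hbeq : ((e.1, e.2.1) == b) = true := by simp [hb]
            rw [if_pos hb, ← hb]
            rw [hbeq, hcont] at h0
            rw [hafter]
            exact sj_perm_erase_middle (by simpa using h0)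
          · rw [if_neg hb]
            have hbeq : ((e.1, e.2.1) == b) = false :=
              beq_false_of_ne (fun h => hb h.symm)
            rw [hbeq] at h0
            rw [hafter]
            simpa using h0
        have := ih (out ++ [e']) _ hinv'
        refine ⟨?_, this.2⟩
        rw [this.1]
        simp

-- step 2: under the invariant, B's box body computes the direct-scan form and preserves it
lemma sj_box_eq (jn u1 u2 : Int) (st : List (Int × Int × Int × Int × List Int))
    (d : PySem.Dict (Int × Int) (List (Int × Int))) (hinv : sjInv jn d st) :
    (sjBoxB jn u1 u2 (st, d)).1 = sjBodySpec jn u1 u2 st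
    ∧ sjInv jn (sjBoxB jn u1 u2 (st, d)).2 (sjBoxB jn u1 u2 (st, d)).1 := by
  have hperm : (d.getD (u1, u2) []).Perm (sjCells jn (u1, u2) st) := hinv (u1, u2)
  unfold sjBoxB sjBodySpec
  simp only
  set P : (Int × Int × Int × Int × List Int) → Bool :=
    fun e => e.1 == u1 && e.2.1 == u2 && e.2.2.2.2.contains jn with hP
  set rc := st.foldl (fun (s : PySem.Set Int × PySem.Set Int) e =>
    if P e then (PySem.Set.add s.1 e.2.2.1, PySem.Set.add s.2 e.2.2.2.1) else s)
    (PySem.Set.empty, PySem.Set.empty) with hrc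
  set cells := d.getD (u1, u2) [] with hcl
  have hPbox : ∀ e : Int × Int × Int × Int × List Int,
      ((e.1, e.2.1) == ((u1, u2) : Int × Int) && e.2.2.2.2.contains jn) = P e := by
    intro e
    rfl
  -- membership of the index-derived row/column sets
  have hmrow : ∀ a, a ∈ PySem.Set.ofList (cells.map Prod.fst) ↔
      ∃ e ∈ st, P e = true ∧ e.2.2.1 = a := by
    intro a
    rw [PySem.Set.mem_ofList]
    constructor
    · intro h
      obtain ⟨c, hc, hfst⟩ := List.mem_map.mp h
      have hsc := hperm.mem_iff.mp hc
      unfold sjCells at hsc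
      obtain ⟨e, he, hcell⟩ := List.mem_map.mp hsc
      obtain ⟨hest, hpe⟩ := List.mem_filter.mp he
      have hpe' : ((e.1, e.2.1) == ((u1, u2) : Int × Int) && e.2.2.2.2.contains jn) = true := hpe
      exact ⟨e, hest, by rw [← hPbox e]; exact hpe', by rw [← hfst, ← hcell]⟩
    · rintro ⟨e, he, hpe, hr⟩
      refine List.mem_map.mpr ⟨(e.2.2.1, e.2.2.2.1), ?_, hr⟩
      refine hperm.mem_iff.mpr ?_
      unfold sjCells
      refine List.mem_map.mpr ⟨e, List.mem_filter.mpr ⟨he, ?_⟩, rfl⟩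
      show ((e.1, e.2.1) == ((u1, u2) : Int × Int) && e.2.2.2.2.contains jn) = true
      rw [hPbox e]; exact hpe
  have hmcol : ∀ a, a ∈ PySem.Set.ofList (cells.map Prod.snd) ↔
      ∃ e ∈ st, P e = true ∧ e.2.2.2.1 = a := by
    intro a
    rw [PySem.Set.mem_ofList]
    constructor
    · intro h
      obtain ⟨c, hc, hfst⟩ := List.mem_map.mp h
      have hsc := hperm.mem_iff.mp hc
      unfold sjCells at hsc
      obtain ⟨e, he, hcell⟩ := List.mem_map.mp hsc
      obtain ⟨hest, hpe⟩ := List.mem_filter.mp he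
      have hpe' : ((e.1, e.2.1) == ((u1, u2) : Int × Int) && e.2.2.2.2.contains jn) = true := hpe
      exact ⟨e, hest, by rw [← hPbox e]; exact hpe', by rw [← hfst, ← hcell]⟩
    · rintro ⟨e, he, hpe, hr⟩
      refine List.mem_map.mpr ⟨(e.2.2.1, e.2.2.2.1), ?_, hr⟩
      refine hperm.mem_iff.mpr ?_
      unfold sjCells
      refine List.mem_map.mpr ⟨e, List.mem_filter.mpr ⟨he, ?_⟩, rfl⟩
      show ((e.1, e.2.1) == ((u1, u2) : Int × Int) && e.2.2.2.2.contains jn) = true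
      rw [hPbox e]; exact hpe
  have hmem1 : ∀ a, a ∈ rc.1 ↔ ∃ e ∈ st, P e = true ∧ e.2.2.1 = a := by
    intro a; rw [hrc, sj_mem_fold_fst]; simp [PySem.Set.empty]
  have hmem2 : ∀ a, a ∈ rc.2 ↔ ∃ e ∈ st, P e = true ∧ e.2.2.2.1 = a := by
    intro a; rw [hrc, sj_mem_fold_snd]; simp [PySem.Set.empty]
  have hnd := sj_nodup_fold P st (PySem.Set.empty, PySem.Set.empty)
    (by simp [PySem.Set.empty]) (by simp [PySem.Set.empty])
  rw [← hrc] at hnd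
  -- the index-derived sets are permutations of the scan-derived ones
  have hp1 : (PySem.Set.ofList (cells.map Prod.fst)).Perm rc.1 :=
    (List.perm_ext_iff_of_nodup (PySem.Set.nodup_ofList _) hnd.1).mpr
      (fun a => (hmrow a).trans (hmem1 a).symm)
  have hp2 : (PySem.Set.ofList (cells.map Prod.snd)).Perm rc.2 :=
    (List.perm_ext_iff_of_nodup (PySem.Set.nodup_ofList _) hnd.2).mpr
      (fun a => (hmcol a).trans (hmem2 a).symm)
  have hl1 : (PySem.Set.ofList (cells.map Prod.fst)).length = rc.1.length := hp1.length_eq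
  have hl2 : (PySem.Set.ofList (cells.map Prod.snd)).length = rc.2.length := hp2.length_eq
  rw [← hl1, ← hl2]
  by_cases hc1 : (PySem.Set.ofList (cells.map Prod.fst)).length = 1 ∧
      1 < (PySem.Set.ofList (cells.map Prod.snd)).length
  · -- row branch
    obtain ⟨a, ha⟩ := List.length_eq_one_iff.mp hc1.1
    have hrc1 : rc.1 = [a] := by
      refine sj_nodup_singleton hnd.1 ((hmem1 a).mpr ?_) (fun x hx => ?_)
      · refine (hmrow a).mp ?_
        rw [ha]; simp
      · have hxm := (hmrow x).mpr ((hmem1 x).mp hx)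
        rw [ha] at hxm
        simpa using hxm
    have hline : (PySem.Set.ofList (cells.map Prod.fst)).headD 0 = rc.1.headD 0 := by
      rw [ha, hrc1]
    rw [if_pos hc1, if_pos hc1, hline]
    have hpg := sj_purge_go jn
      (fun e => e.1 == u1 && e.2.1 != u2 && e.2.2.1 == rc.1.headD 0) st [] d
      (by intro b; simpa using hinv b)
    exact ⟨hpg.1.trans (by simp), hpg.2⟩
  · rw [if_neg hc1, if_neg hc1]
    by_cases hc2 : (PySem.Set.ofList (cells.map Prod.snd)).length = 1 ∧
        1 < (PySem.Set.ofList (cells.map Prod.fst)).length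
    · -- column branch
      obtain ⟨a, ha⟩ := List.length_eq_one_iff.mp hc2.1
      have hrc2 : rc.2 = [a] := by
        refine sj_nodup_singleton hnd.2 ((hmem2 a).mpr ?_) (fun x hx => ?_)
        · refine (hmcol a).mp ?_
          rw [ha]; simp
        · have hxm := (hmcol x).mpr ((hmem2 x).mp hx)
          rw [ha] at hxm
          simpa using hxm
      have hx : (PySem.Set.ofList (cells.map Prod.snd)).headD 0 = rc.2.headD 0 := by
        rw [ha, hrc2]
      rw [if_pos hc2, if_pos hc2, hx]
      have hpg := sj_purge_go jn
        (fun e => e.2.1 == u2 && e.1 != u1 && e.2.2.2.1 == rc.2.headD 0) st [] d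
        (by intro b; simpa using hinv b)
      exact ⟨hpg.1.trans (by simp), hpg.2⟩
    · rw [if_neg hc2, if_neg hc2]
      exact ⟨rfl, hinv⟩

-- the inner (unit) and outer (units) box loops, under the invariant
lemma sj_fold_inner (jn u1 : Int) :
    ∀ (us : List Int)
      (acc : List (Int × Int × Int × Int × List Int) × PySem.Dict (Int × Int) (List (Int × Int))),
      sjInv jn acc.2 acc.1 →
      (us.foldl (fun a u2 => sjBoxB jn u1 u2 a) acc).1
        = us.foldl (fun s u2 => sjBodyA jn u1 u2 s) acc.1
      ∧ sjInv jn (us.foldl (fun a u2 => sjBoxB jn u1 u2 a) acc).2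
          (us.foldl (fun a u2 => sjBoxB jn u1 u2 a) acc).1 := by
  intro us
  induction us with
  | nil => intro acc hinv; exact ⟨rfl, hinv⟩
  | cons u2 rest ih =>
    rintro ⟨s, d⟩ hinv
    rw [List.foldl_cons, List.foldl_cons]
    have hb := sj_box_eq jn u1 u2 s d hinv
    have := ih (sjBoxB jn u1 u2 (s, d)) hb.2
    refine ⟨?_, this.2⟩
    rw [this.1, hb.1, sj_body_eq]

lemma sj_fold_outer (jn : Int) :
    ∀ (us1 us2 : List Int)
      (acc : List (Int × Int × Int × Int × List Int) × PySem.Dict (Int × Int) (List (Int × Int))),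
      sjInv jn acc.2 acc.1 →
      (us1.foldl (fun a u1 => us2.foldl (fun a u2 => sjBoxB jn u1 u2 a) a) acc).1
        = us1.foldl (fun s u1 => us2.foldl (fun s u2 => sjBodyA jn u1 u2 s) s) acc.1
      ∧ sjInv jn (us1.foldl (fun a u1 => us2.foldl (fun a u2 => sjBoxB jn u1 u2 a) a) acc).2
          (us1.foldl (fun a u1 => us2.foldl (fun a u2 => sjBoxB jn u1 u2 a) a) acc).1 := by
  intro us1
  induction us1 with
  | nil => intro us2 acc hinv; exact ⟨rfl, hinv⟩
  | cons u1 rest ih =>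
    intro us2 acc hinv
    rw [List.foldl_cons, List.foldl_cons]
    have hin := sj_fold_inner jn u1 us2 acc hinv
    have := ih us2 _ hin.2
    refine ⟨?_, this.2⟩
    rw [this.1, hin.1]

lemma sj_main (dic : List (Int × Int × Int × Int × List Int)) :
    second_judge dic = second_judge_alt dic := by
  unfold second_judge second_judge_alt
  suffices h : ∀ (jns : List Int) (st : List (Int × Int × Int × Int × List Int)),
      jns.foldl (fun st jn =>
        (PySem.List.pyRange 0 3 1).foldl (fun st u1 =>
          (PySem.List.pyRange 0 3 1).foldl (fun st u2 => sjBodyA jn u1 u2 st) st) st) st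
      = jns.foldl (fun st jn =>
        ((PySem.List.pyRange 0 3 1).foldl (fun acc u1 =>
          (PySem.List.pyRange 0 3 1).foldl (fun acc u2 => sjBoxB jn u1 u2 acc) acc)
          (st, sjBuild jn st)).1) st from h _ dic
  intro jns
  induction jns with
  | nil => intro st; simp only [List.foldl_nil]
  | cons jn rest ih =>
    intro st
    have hinv : sjInv jn (sjBuild jn st) st := by
      intro b
      rw [sj_build_getD]
    have hstep := (sj_fold_outer jn (PySem.List.pyRange 0 3 1) (PySem.List.pyRange 0 3 1)
      (st, sjBuild jn st) hinv).1
    rw [List.foldl_cons, List.foldl_cons, ← hstep]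
    exact ih _

-- ===== VERDICT (by name: the statement is the Claim_ definition above) =====
theorem second_judge_spec : Claim_equal_second_judge := by
  intro dic _
  unfold Spec_second_judge
  exact sj_main dic
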